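-- pv_equiv track=rewrite | github.com/kloskar/GSP | tree.py | contains_with_int_constraints
-- ===== SOURCE A (Python) =====
-- from typing import Dict, List, Tuple, FrozenSet, Optional, Set
--
-- Pattern = Tuple[FrozenSet[str], ...]
--
-- TimedSequenceInt = List[Tuple[int, Set[str]]]  # [(data_int, itemset), ...]
--
-- def contains_with_int_constraints(
--     seq: TimedSequenceInt,
--     pat: Pattern,
--     min_gap: int,
--     max_gap: int,
--     win_size: Optional[int] = None
-- ) -> bool:
--     """
--     seq = [(t_int, itemset), ...] z rosnącym t_int (nie musi być ciągły).
--     Warunki: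
--       - pat[i] ⊆ itemset w danych
--       - min_gap <= (t_next - t_prev) <= max_gap
--       - jeśli win_size: (t_last - t_first) <= win_size
--     """
--     if not pat:
--         return True
--
--     # pozycje w seq, gdzie pasuje każdy itemset wzorca
--     positions: List[List[int]] = []
--     for iset in pat:
--         matches = [i for i, (_, X) in enumerate(seq) if iset.issubset(X)]
--         if not matches:
--             return False
--         positions.append(matches)
--
--     def dfs(k: int, prev_idx: int, first_t: int, prev_t: int) -> bool:
--         if k == len(pat):
--             return True
--         for idx in positions[k]:
--             if idx <= prev_idx:
--                 continue
--             t = seq[idx][0]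
--             dt = t - prev_t
--             if dt < min_gap or dt > max_gap:
--                 continue
--             if win_size is not None and (t - first_t) > win_size:
--                 continue
--             if dfs(k + 1, idx, first_t, t):
--                 return True
--         return False
--
--     for start_idx in positions[0]:
--         t0 = seq[start_idx][0]
--         if dfs(1, start_idx, t0, t0):
--             return True
--
--     return False
-- ===== SOURCE B (Python) =====
-- from typing import Dict, List, Tuple, FrozenSet, Optional, Set
--
-- Pattern = Tuple[FrozenSet[str], ...]
-- TimedSequenceInt = List[Tuple[int, Set[str]]]
--
-- def contains_with_int_constraints(
--     seq: TimedSequenceInt,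
--     pat: Pattern,
--     min_gap: int,
--     max_gap: int,
--     win_size: Optional[int] = None
-- ) -> bool:
--     # Level-by-level DP over pattern positions: dp maps end-index -> largest
--     # start time among valid partial chains ending there (the largest start
--     # time is the one that makes every future window check easiest to pass).
--     if not pat:
--         return True
--     times = [t for t, _ in seq]
--
--     def matches(iset):
--         return [i for i, (_, X) in enumerate(seq) if iset.issubset(X)]
--
--     dp = {j: times[j] for j in matches(pat[0])}
--     for iset in pat[1:]:
--         ndp = {}
--         for j in matches(iset):
--             tj = times[j]
--             best = None
--             for i, f in dp.items():
--                 if i < j and min_gap <= tj - times[i] <= max_gap and \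
--                    (win_size is None or tj - f <= win_size):
--                     if best is None or f > best:
--                         best = f
--             if best is not None:
--                 ndp[j] = best
--         dp = ndp
--     return bool(dp)
-- ===== Notes on version B (the rewrite author's own statement) =====
-- stated objective: alternative
-- what changed: Replaces A's backtracking DFS over all starting positions by a level-by-level dynamic program that keeps, for each sequence index, the largest feasible start time of a valid partial chain ending there (largest start time dominates all others for the window check).
import Mathlib
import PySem

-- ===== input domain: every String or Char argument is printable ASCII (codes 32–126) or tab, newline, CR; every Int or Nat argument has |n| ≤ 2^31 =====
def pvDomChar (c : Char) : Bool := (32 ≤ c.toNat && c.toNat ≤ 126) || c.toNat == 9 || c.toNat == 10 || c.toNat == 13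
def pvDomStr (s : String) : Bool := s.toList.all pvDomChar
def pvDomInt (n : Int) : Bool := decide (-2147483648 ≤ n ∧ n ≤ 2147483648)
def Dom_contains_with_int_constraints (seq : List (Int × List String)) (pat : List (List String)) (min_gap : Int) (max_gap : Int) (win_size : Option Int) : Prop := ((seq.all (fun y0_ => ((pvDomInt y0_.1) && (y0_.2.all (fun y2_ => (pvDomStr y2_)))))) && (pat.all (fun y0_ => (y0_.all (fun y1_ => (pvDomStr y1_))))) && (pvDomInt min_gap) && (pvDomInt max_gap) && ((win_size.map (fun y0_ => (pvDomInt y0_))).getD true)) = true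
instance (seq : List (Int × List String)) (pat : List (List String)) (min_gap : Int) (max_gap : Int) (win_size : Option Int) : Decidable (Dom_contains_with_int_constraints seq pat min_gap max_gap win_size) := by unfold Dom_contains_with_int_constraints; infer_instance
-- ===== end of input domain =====

-- B replaces A's backtracking DFS over start positions by a level-by-level dynamic
-- program (end index ↦ largest feasible start time): an alternative algorithm.

-- time of the i-th event (i always in range where the ports use it)
def pvT (seq : List (Int × List String)) (i : Nat) : Int :=
  (seq.getD i ((0 : Int), ([] : List String))).1

-- [i for i,(_,X) in enumerate(seq) if iset.issubset(X)]
def pvMatches (seq : List (Int × List String)) (iset : List String) : List Nat :=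
  (List.range seq.length).filter
    (fun i => iset.all (fun s => ((seq.getD i ((0 : Int), ([] : List String))).2).contains s))

-- ===== PORT A =====
-- A's positions-building loop with its early `return False` (none = early False)
def pvBuildPositions (seq : List (Int × List String)) : List (List String) → Option (List (List Nat))
  | [] => some []
  | iset :: rest =>
      let ms := pvMatches seq iset
      if ms.isEmpty then none
      else (pvBuildPositions seq rest).map (fun ps => ms :: ps)

-- the `win_size is not None and (t - first_t) > win_size` test
def pvWinBad (w : Option Int) (f t : Int) : Bool :=
  match w with
  | none => false
  | some x => decide (x < t - f)

-- A's dfs, recursing over the remaining levels of `positions`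
def pvDfsA (seq : List (Int × List String)) (g G : Int) (w : Option Int) :
    List (List Nat) → Nat → Int → Int → Bool
  | [], _, _, _ => true
  | ms :: rest, prev, first_t, prev_t =>
      ms.any (fun idx =>
        if idx ≤ prev then false
        else
          let t := pvT seq idx
          let dt := t - prev_t
          if dt < g then false
          else if G < dt then false
          else if pvWinBad w first_t t then false
          else pvDfsA seq g G w rest idx first_t t)

def contains_with_int_constraints (seq : List (Int × List String)) (pat : List (List String)) (min_gap : Int) (max_gap : Int) (win_size : Option Int) : Bool :=
  match pat with
  | [] => true
  | _ :: _ =>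
    match pvBuildPositions seq pat with
    | none => false
    | some [] => false   -- unreachable: pat is nonempty
    | some (p0 :: rest) =>
        p0.any (fun s => pvDfsA seq min_gap max_gap win_size rest s (pvT seq s) (pvT seq s))

-- ===== PORT B =====
-- B's running maximum over the candidate first-times (Python's `best` loop)
def pvBestF (cands : List Int) : Option Int :=
  cands.foldl (fun b f =>
    match b with
    | none => some f
    | some m => if m < f then some f else some m) none

-- one DP level: dp maps end index ↦ largest feasible first time
def pvStep (seq : List (Int × List String)) (g G : Int) (w : Option Int)
    (dp : List (Nat × Int)) (ms : List Nat) : List (Nat × Int) :=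
  ms.filterMap (fun j =>
    let tj := pvT seq j
    let cands := dp.filterMap (fun p =>
      if p.1 < j && decide (g ≤ tj - pvT seq p.1) && decide (tj - pvT seq p.1 ≤ G) &&
         !pvWinBad w p.2 tj
      then some p.2 else none)
    (pvBestF cands).map (fun m => (j, m)))

def contains_with_int_constraints_alt (seq : List (Int × List String)) (pat : List (List String)) (min_gap : Int) (max_gap : Int) (win_size : Option Int) : Bool :=
  match pat with
  | [] => true
  | p0 :: rest =>
      let dp0 := (pvMatches seq p0).map (fun j => (j, pvT seq j))
      let dpF := rest.foldl
        (fun dp iset => pvStep seq min_gap max_gap win_size dp (pvMatches seq iset)) dp0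
      !dpF.isEmpty

-- ===== PRECONDITION & SPEC =====
def Spec_contains_with_int_constraints (seq : List (Int × List String)) (pat : List (List String)) (min_gap : Int) (max_gap : Int) (win_size : Option Int) (out : Bool) : Prop := out = contains_with_int_constraints_alt seq pat min_gap max_gap win_size
instance (seq : List (Int × List String)) (pat : List (List String)) (min_gap : Int) (max_gap : Int) (win_size : Option Int) (out : Bool) : Decidable (Spec_contains_with_int_constraints seq pat min_gap max_gap win_size out) := by unfold Spec_contains_with_int_constraints; infer_instance

-- ===== CLAIM (what is proved, stated in full; the proofs are below) =====
def Claim_equal_contains_with_int_constraints : Prop := ∀ (seq : List (Int × List String)) (pat : List (List String)) (min_gap : Int) (max_gap : Int) (win_size : Option Int), Dom_contains_with_int_constraints seq pat min_gap max_gap win_size → Spec_contains_with_int_constraints seq pat min_gap max_gap win_size (contains_with_int_constraints seq pat min_gap max_gap win_size)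

-- ===== LEMMAS AND PROOFS =====

-- the window condition as a Prop
def pvWinOk (w : Option Int) (f t : Int) : Prop := ∀ x, w = some x → t - f ≤ x

-- a valid chain: from index i (first time f), one matching index per level, ending at j
def pvPath (seq : List (Int × List String)) (g G : Int) (w : Option Int) (f : Int) :
    Nat → List (List Nat) → Nat → Prop
  | i, [], j => j = i
  | i, ms :: rest, j =>
      ∃ k, k ∈ ms ∧ i < k ∧ g ≤ pvT seq k - pvT seq i ∧ pvT seq k - pvT seq i ≤ G ∧
        pvWinOk w f (pvT seq k) ∧ pvPath seq g G w f k rest j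

-- a full chain starting in ms0 through `done`, ending at j with first time f
def pvReach (seq : List (Int × List String)) (g G : Int) (w : Option Int)
    (ms0 : List Nat) (done : List (List Nat)) (j : Nat) (f : Int) : Prop :=
  ∃ s, s ∈ ms0 ∧ f = pvT seq s ∧ pvPath seq g G w f s done j

lemma pvWinBad_false_iff (w : Option Int) (f t : Int) :
    pvWinBad w f t = false ↔ pvWinOk w f t := by
  cases w <;> simp [pvWinBad, pvWinOk]

lemma pvDfsA_iff (seq : List (Int × List String)) (g G : Int) (w : Option Int)
    (levels : List (List Nat)) (i : Nat) (f : Int) :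
    pvDfsA seq g G w levels i f (pvT seq i) = true ↔ ∃ j, pvPath seq g G w f i levels j := by
  induction levels generalizing i with
  | nil => simp [pvDfsA, pvPath]
  | cons ms rest ih =>
    simp only [pvDfsA, List.any_eq_true, pvPath]
    constructor
    · rintro ⟨k, hk, hcond⟩
      split_ifs at hcond with h1 h2 h3 h4
      obtain ⟨j, hj⟩ := (ih k).mp hcond
      refine ⟨j, k, hk, by omega, by omega, by omega,
        (pvWinBad_false_iff w f (pvT seq k)).mp (by simpa using h4), hj⟩
    · rintro ⟨j, k, hk, hik, hg, hG, hw, hp⟩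
      refine ⟨k, hk, ?_⟩
      have h4 : pvWinBad w f (pvT seq k) = false := (pvWinBad_false_iff w f (pvT seq k)).mpr hw
      split_ifs with h1 h2 h3 h4'
      · omega
      · omega
      · omega
      · simp_all
      · exact (ih k).mpr ⟨j, hp⟩

lemma pvBestF_go (l : List Int) (b : Option Int) :
    (l.foldl (fun b f => match b with
      | none => some f
      | some m => if m < f then some f else some m) b = none ↔ (l = [] ∧ b = none)) ∧
    (∀ m, l.foldl (fun b f => match b with
      | none => some f
      | some m => if m < f then some f else some m) b = some m →
      (m ∈ l ∨ b = some m) ∧ (∀ x ∈ l, x ≤ m) ∧ (∀ y, b = some y → y ≤ m)) := by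
  induction l generalizing b with
  | nil =>
    refine ⟨by simp, ?_⟩
    intro m hm
    simp only [List.foldl_nil] at hm
    exact ⟨Or.inr hm, by simp, fun y hy => by rw [hm] at hy; cases hy; exact le_refl m⟩
  | cons a l ih =>
    simp only [List.foldl_cons, List.mem_cons]
    set b' : Option Int := (match b with
      | none => some a
      | some m => if m < a then some a else some m) with hb'
    have hb'ne : b' ≠ none := by
      cases b with
      | none => simp [hb']
      | some y => simp only [hb']; split <;> simp
    obtain ⟨c, hc⟩ := Option.ne_none_iff_exists'.mp hb'ne
    have hca : a ≤ c ∧ (c = a ∨ b = some c) ∧ (∀ y, b = some y → y ≤ c) := by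
      cases b with
      | none =>
        simp only [hb'] at hc
        cases hc
        exact ⟨le_refl a, Or.inl rfl, fun y hy => by cases hy⟩
      | some y =>
        simp only [hb'] at hc
        by_cases hy : y < a
        · rw [if_pos hy] at hc; cases hc
          exact ⟨le_refl a, Or.inl rfl, fun z hz => by cases hz; omega⟩
        · rw [if_neg hy] at hc; cases hc
          exact ⟨by omega, Or.inr rfl, fun z hz => by cases hz; omega⟩
    constructor
    · rw [(ih b').1]
      constructor
      · rintro ⟨_, h⟩; exact absurd h hb'ne
      · rintro ⟨h, _⟩; cases h
    · intro m hm
      obtain ⟨h1, h2, h3⟩ := (ih b').2 m hm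
      have hcm : c ≤ m := h3 c hc
      refine ⟨?_, ?_, ?_⟩
      · rcases h1 with h1 | h1
        · exact Or.inl (Or.inr h1)
        · rw [hc] at h1
          cases Option.some_inj.mp h1
          rcases hca.2.1 with h | h
          · exact Or.inl (Or.inl h)
          · exact Or.inr h
      · intro x hx
        rcases hx with hx | hx
        · subst hx; omega
        · exact h2 x hx
      · intro y hy
        have := hca.2.2 y hy
        omega

lemma pvPath_snoc (seq : List (Int × List String)) (g G : Int) (w : Option Int) (f : Int)
    (done : List (List Nat)) (ms : List Nat) (s i k : Nat)
    (hp : pvPath seq g G w f s done i) (hk : k ∈ ms) (hik : i < k)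
    (hg : g ≤ pvT seq k - pvT seq i) (hG : pvT seq k - pvT seq i ≤ G)
    (hw : pvWinOk w f (pvT seq k)) : pvPath seq g G w f s (done ++ [ms]) k := by
  induction done generalizing s with
  | nil =>
    simp only [pvPath] at hp
    subst hp
    exact ⟨k, hk, hik, hg, hG, hw, rfl⟩
  | cons m0 d ih =>
    obtain ⟨k0, hk0, h1, h2, h3, h4, hp'⟩ := hp
    exact ⟨k0, hk0, h1, h2, h3, h4, ih k0 hp'⟩

lemma pvPath_unsnoc (seq : List (Int × List String)) (g G : Int) (w : Option Int) (f : Int)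
    (done : List (List Nat)) (ms : List Nat) (s j : Nat)
    (hp : pvPath seq g G w f s (done ++ [ms]) j) :
    ∃ i, pvPath seq g G w f s done i ∧ j ∈ ms ∧ i < j ∧
      g ≤ pvT seq j - pvT seq i ∧ pvT seq j - pvT seq i ≤ G ∧ pvWinOk w f (pvT seq j) := by
  induction done generalizing s with
  | nil =>
    obtain ⟨k, hk, h1, h2, h3, h4, hp'⟩ := hp
    simp only [pvPath] at hp'
    subst hp'
    exact ⟨s, rfl, hk, h1, h2, h3, h4⟩
  | cons m0 d ih =>
    obtain ⟨k0, hk0, h1, h2, h3, h4, hp'⟩ := hp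
    obtain ⟨i, hi, rest⟩ := ih k0 hp'
    exact ⟨i, ⟨k0, hk0, h1, h2, h3, h4, hi⟩, rest⟩

lemma pvPath_no_empty (seq : List (Int × List String)) (g G : Int) (w : Option Int) (f : Int)
    (levels : List (List Nat)) (s j : Nat) (hp : pvPath seq g G w f s levels j) :
    ([] : List Nat) ∉ levels := by
  induction levels generalizing s with
  | nil => simp
  | cons ms rest ih =>
    obtain ⟨k, hk, _, _, _, _, hp'⟩ := hp
    simp only [List.mem_cons, not_or]
    exact ⟨fun h => by subst h; exact absurd hk (List.not_mem_nil), ih k hp'⟩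

lemma pvFoldl_inv (seq : List (Int × List String)) (g G : Int) (w : Option Int)
    (ms0 : List Nat) :
    ∀ (rest : List (List Nat)) (dp : List (Nat × Int)) (done : List (List Nat)),
    (∀ j f, (j, f) ∈ dp → pvReach seq g G w ms0 done j f) →
    (∀ j f, pvReach seq g G w ms0 done j f → ∃ f', f ≤ f' ∧ (j, f') ∈ dp) →
    ((rest.foldl (fun dp ms => pvStep seq g G w dp ms) dp ≠ []) ↔
      ∃ j f, pvReach seq g G w ms0 (done ++ rest) j f) := by
  intro rest
  induction rest with
  | nil =>
    intro dp done ha hb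
    simp only [List.foldl_nil, List.append_nil]
    constructor
    · intro hne
      match dp, hne with
      | (j, f) :: _, _ => exact ⟨j, f, ha j f List.mem_cons_self⟩
    · rintro ⟨j, f, hr⟩
      obtain ⟨f', _, hmem⟩ := hb j f hr
      exact List.ne_nil_of_mem hmem
  | cons ms rest' ih =>
    intro dp done ha hb
    simp only [List.foldl_cons]
    have key := ih (pvStep seq g G w dp ms) (done ++ [ms]) ?_ ?_
    · rw [key, List.append_assoc]
      simp
    · -- soundness of one step
      intro j f hmem
      simp only [pvStep, List.mem_filterMap, Option.map_eq_some_iff] at hmem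
      obtain ⟨j0, hj0, m, hbest, heq⟩ := hmem
      rw [Prod.mk.injEq] at heq
      obtain ⟨h1, h2⟩ := heq
      subst h1; subst h2
      have hmem_c := ((pvBestF_go _ none).2 m hbest).1
      rcases hmem_c with hmem_c | hc
      · simp only [List.mem_filterMap] at hmem_c
        obtain ⟨p, hp, hcf⟩ := hmem_c
        split at hcf
        · next hcond =>
          cases Option.some_inj.mp hcf
          simp only [Bool.and_eq_true, decide_eq_true_eq, Bool.not_eq_true'] at hcond
          obtain ⟨⟨⟨h1, h2⟩, h3⟩, h4⟩ := hcond
          have hwin : pvWinOk w p.2 (pvT seq j0) := (pvWinBad_false_iff w p.2 (pvT seq j0)).mp h4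
          obtain ⟨s, hs, hfs, hpath⟩ := ha p.1 p.2 hp
          exact ⟨s, hs, hfs, pvPath_snoc seq g G w p.2 done ms s p.1 j0 hpath hj0 h1 h2 h3 hwin⟩
        · exact absurd hcf (by simp)
      · cases hc
    · -- completeness of one step
      intro j f hr
      obtain ⟨s, hs, hfs, hpath⟩ := hr
      obtain ⟨i, hpd, hjms, hij, hg2, hG2, hwin⟩ := pvPath_unsnoc seq g G w f done ms s j hpath
      obtain ⟨f', hff', hmem⟩ := hb i f ⟨s, hs, hfs, hpd⟩
      have hfc : f' ∈ dp.filterMap (fun p =>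
          if p.1 < j && decide (g ≤ pvT seq j - pvT seq p.1) &&
             decide (pvT seq j - pvT seq p.1 ≤ G) &&
             !pvWinBad w p.2 (pvT seq j)
          then some p.2 else none) := by
        simp only [List.mem_filterMap]
        refine ⟨(i, f'), hmem, ?_⟩
        split
        · rfl
        · next hneg =>
          exfalso
          apply hneg
          simp only [Bool.and_eq_true, decide_eq_true_eq, Bool.not_eq_true']
          refine ⟨⟨⟨by simpa using hij, hg2⟩, hG2⟩, ?_⟩
          exact (pvWinBad_false_iff w f' (pvT seq j)).mpr
            (fun x hx => by have := hwin x hx; omega)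
      set cands := dp.filterMap (fun p =>
          if p.1 < j && decide (g ≤ pvT seq j - pvT seq p.1) &&
             decide (pvT seq j - pvT seq p.1 ≤ G) &&
             !pvWinBad w p.2 (pvT seq j)
          then some p.2 else none) with hcands
      have hne : pvBestF cands ≠ none := by
        intro hnone
        rw [pvBestF] at hnone
        have := ((pvBestF_go cands none).1).mp hnone
        rw [this.1] at hfc
        exact absurd hfc (List.not_mem_nil)
      obtain ⟨m, hm⟩ := Option.ne_none_iff_exists'.mp hne
      obtain ⟨_, h2, _⟩ := (pvBestF_go cands none).2 m hm
      refine ⟨m, le_trans hff' (h2 f' hfc), ?_⟩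
      simp only [pvStep, List.mem_filterMap]
      exact ⟨j, hjms, by rw [← hcands, hm]; rfl⟩

lemma pvBuild_cases (seq : List (Int × List String)) :
    ∀ pat : List (List String),
    (pvBuildPositions seq pat = some (pat.map (pvMatches seq)) ∧
      ∀ iset ∈ pat, pvMatches seq iset ≠ []) ∨
    (pvBuildPositions seq pat = none ∧ ∃ iset ∈ pat, pvMatches seq iset = []) := by
  intro pat
  induction pat with
  | nil => left; simp [pvBuildPositions]
  | cons iset rest ih =>
    by_cases hms : pvMatches seq iset = []
    · right
      refine ⟨?_, iset, List.mem_cons_self, hms⟩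
      simp [pvBuildPositions, hms]
    · rcases ih with ⟨h1, h2⟩ | ⟨h1, iset', hmem, hempty⟩
      · left
        refine ⟨?_, ?_⟩
        · simp [pvBuildPositions, List.isEmpty_iff, hms, h1]
        · intro is his
          rcases List.mem_cons.mp his with h | h
          · subst h; exact hms
          · exact h2 is h
      · right
        refine ⟨?_, iset', List.mem_cons_of_mem _ hmem, hempty⟩
        simp [pvBuildPositions, List.isEmpty_iff, hms, h1]

lemma pvMain (seq : List (Int × List String)) (pat : List (List String))
    (g G : Int) (w : Option Int) :
    contains_with_int_constraints seq pat g G w =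
      contains_with_int_constraints_alt seq pat g G w := by
  cases pat with
  | nil => rfl
  | cons p0 rest =>
    have hB : contains_with_int_constraints_alt seq (p0 :: rest) g G w = true ↔
        ∃ j f, pvReach seq g G w (pvMatches seq p0) (rest.map (pvMatches seq)) j f := by
      simp only [contains_with_int_constraints_alt, Bool.not_eq_true',
        List.isEmpty_eq_false_iff_exists_mem]
      rw [← List.foldl_map]
      have := pvFoldl_inv seq g G w (pvMatches seq p0) (rest.map (pvMatches seq))
        ((pvMatches seq p0).map (fun j => (j, pvT seq j))) [] ?_ ?_
      · simp only [List.nil_append] at this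
        rw [← this]
        constructor
        · rintro ⟨x, hx⟩; exact List.ne_nil_of_mem hx
        · exact fun h => List.exists_mem_of_ne_nil _ h
      · intro j f hmem
        simp only [List.mem_map] at hmem
        obtain ⟨s, hs, heq⟩ := hmem
        rw [Prod.mk.injEq] at heq
        obtain ⟨h1, h2⟩ := heq
        subst h1; subst h2
        exact ⟨s, hs, rfl, rfl⟩
      · intro j f hr
        obtain ⟨s, hs, hfs, hpath⟩ := hr
        have hjs : j = s := hpath
        subst hjs
        exact ⟨pvT seq j, le_of_eq hfs, List.mem_map.mpr ⟨j, hs, rfl⟩⟩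
    rcases pvBuild_cases seq (p0 :: rest) with ⟨hsome, _⟩ | ⟨hnone, iset, hmem, hemp⟩
    · have hA : contains_with_int_constraints seq (p0 :: rest) g G w = true ↔
          ∃ j f, pvReach seq g G w (pvMatches seq p0) (rest.map (pvMatches seq)) j f := by
        simp only [contains_with_int_constraints, hsome, List.map_cons, List.any_eq_true]
        constructor
        · rintro ⟨s, hs, hdfs⟩
          obtain ⟨j, hj⟩ := (pvDfsA_iff seq g G w (rest.map (pvMatches seq)) s (pvT seq s)).mp hdfs
          exact ⟨j, pvT seq s, s, hs, rfl, hj⟩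
        · rintro ⟨j, f, s, hs, hfs, hpath⟩
          subst hfs
          exact ⟨s, hs, (pvDfsA_iff seq g G w (rest.map (pvMatches seq)) s (pvT seq s)).mpr ⟨j, hpath⟩⟩
      rw [Bool.eq_iff_iff]
      exact hA.trans hB.symm
    · have hnor : ¬ ∃ j f, pvReach seq g G w (pvMatches seq p0) (rest.map (pvMatches seq)) j f := by
        rintro ⟨j, f, s, hs, hfs, hpath⟩
        rcases List.mem_cons.mp hmem with h | h
        · subst h; rw [hemp] at hs; exact absurd hs List.not_mem_nil
        · exact absurd (List.mem_map.mpr ⟨iset, h, hemp⟩)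
            (pvPath_no_empty seq g G w f (rest.map (pvMatches seq)) s j hpath)
      have hBf : contains_with_int_constraints_alt seq (p0 :: rest) g G w = false := by
        rw [Bool.eq_false_iff]
        intro h
        exact hnor (hB.mp h)
      rw [hBf]
      simp [contains_with_int_constraints, hnone]

-- ===== VERDICT (by name: the statement is the Claim_ definition above) =====
theorem contains_with_int_constraints_spec : Claim_equal_contains_with_int_constraints := by
  intro seq pat g G w _
  exact pvMain seq pat g G w
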